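-- pv_equiv track=rewrite | github.com/scheduling-cc/pyscheduling | src/pyscheduling/Problem.py | read_3D
-- ===== SOURCE A (Python) =====
-- from typing import Dict, List
--
-- def read_3D(dimension_i : int, dimension_j : int, content: List[str], startIndex: int):
--     """Read the table of matrices from a list of lines extracted from the file of the instance
--
--     Args:
--         dimension_i (int): Dimension of the table, usually number of machines 'm'.
--         dimension_j (int): Dimension of the matrix, usually number of jobs 'n'.
--         content (list[str]): lines of the file of the instance
--         startIndex (int): Index from where starts the table of matrices
--
--     Returns:
--        (list[list[list[int]]],int): (Table of matrices, index of the next section of the instance)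
--     """
--     i = startIndex
--     S = []  # Table of Matrix S_ijk : Setup time between jobs j and k on machine i
--     i += 1  # Skip SSD
--     endIndex = startIndex+1+dimension_j*dimension_i+dimension_i
--     while i != endIndex:
--         i = i+1  # Skip Mk
--         Si = []
--         for k in range(dimension_j):
--             ligne = content[i].strip().split('\t')
--             Sij = [int(val_str) for val_str in ligne]
--             Si.append(Sij)
--             i += 1
--         S.append(Si)
--     return (S, i)
-- ===== SOURCE B (Python) =====
-- def read_3D(dimension_i, dimension_j, content, startIndex):
--     end = startIndex + 1 + dimension_i * (dimension_j + 1)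
--     table = content[startIndex + 1:end]
--     rows = [[int(x) for x in line.strip().split('\t')]
--             for idx, line in enumerate(table) if idx % (dimension_j + 1) != 0]
--     S = [rows[m * dimension_j:(m + 1) * dimension_j] for m in range(dimension_i)]
--     return (S, end)
-- ===== Notes on version B (the rewrite author's own statement) =====
-- stated objective: alternative
-- what changed: Replaces A's cursor-threaded nested loops (a while loop walking an index i through content) with a staged pipeline: slice the whole table out of content once, parse every data line in a single enumerate-filter pass that drops header lines by their residue mod (dimension_j+1), then regroup the flat row list into per-machine matrices by chunk slicing.
-- outside the precondition, e.g. on read_3D(1, 1, ['5', '6', '7'], -3): A returns ([[[7]]], 0), B returns ([[]], 0); on read_3D(2, -1, ['x'], 0): A returns ([], 1), B returns ([[], []], 1); on read_3D(-2, -2, ['x'], 5): A returns ([[], []], 8), B returns ([], 8)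
import Mathlib
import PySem

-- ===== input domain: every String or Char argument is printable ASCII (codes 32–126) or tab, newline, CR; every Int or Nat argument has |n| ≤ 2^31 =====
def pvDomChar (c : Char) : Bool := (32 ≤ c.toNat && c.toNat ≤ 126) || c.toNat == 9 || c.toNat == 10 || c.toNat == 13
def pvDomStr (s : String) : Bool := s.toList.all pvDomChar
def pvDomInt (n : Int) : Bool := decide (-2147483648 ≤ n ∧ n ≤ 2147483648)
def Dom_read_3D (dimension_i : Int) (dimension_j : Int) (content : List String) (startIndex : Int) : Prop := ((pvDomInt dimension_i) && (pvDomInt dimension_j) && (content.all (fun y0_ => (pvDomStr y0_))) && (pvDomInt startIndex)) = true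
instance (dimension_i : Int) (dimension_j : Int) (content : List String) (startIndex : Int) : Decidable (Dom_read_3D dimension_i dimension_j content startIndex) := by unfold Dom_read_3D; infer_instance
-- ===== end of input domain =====

-- B replaces A's cursor-threaded nested loops with a staged pipeline: slice the table out of
-- content once, parse all data lines in one enumerate+filter pass (headers dropped by residue
-- mod (dimension_j+1)), then regroup the flat row list by chunk slicing; objective: alternative.

-- ===== PORT A =====
-- [int(v) for v in line.strip().split('\t')]; none = ValueError (shared by both ports verbatim)
def pvParseStr (line : String) : Option (List Int) :=
  (PySem.Chars.splitOn (PySem.Chars.strip line.toList) "\t".toList).mapM PySem.Int.ofChars?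

-- content[i].strip().split('\t') parsed; none = IndexError/ValueError
def pvParseLine (content : List String) (i : Int) : Option (List Int) :=
  match PySem.List.pyGet? content i with
  | none => none
  | some s => pvParseStr s

-- one step of A's inner `for k in range(dimension_j)` loop (state: cursor i, rows so far)
def pvRowStep (content : List String) (acc : Option (Int × List (List Int))) (_k : Int) :
    Option (Int × List (List Int)) :=
  match acc with
  | none => none
  | some (i, Si) =>
    match pvParseLine content i with
    | none => none
    | some row => some (i + 1, Si ++ [row])

-- A's inner for-loop over range(dimension_j), starting at cursor i
def pvRowsA (content : List String) (dimension_j : Int) (i : Int) :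
    Option (Int × List (List Int)) :=
  (PySem.List.pyRange 0 dimension_j 1).foldl (pvRowStep content) (some (i, []))

-- A's `while i != endIndex` loop; fuel bounds the iterations (inside Pre_ the loop runs
-- exactly dimension_i times); none = the Python raises (or the fuel guard only makes it total)
def pvLoopA (content : List String) (dimension_j : Int) (endIndex : Int) :
    Nat → Int → List (List (List Int)) → Option (List (List (List Int)) × Int)
  | 0, i, S => if i = endIndex then some (S, i) else none
  | f + 1, i, S =>
    if i = endIndex then some (S, i)
    else
      match pvRowsA content dimension_j (i + 1) with
      | none => none
      | some (i', Si) => pvLoopA content dimension_j endIndex f i' (S ++ [Si])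

def read_3D (dimension_i : Int) (dimension_j : Int) (content : List String) (startIndex : Int) :
    List (List (List Int)) × Int :=
  (pvLoopA content dimension_j (startIndex + 1 + dimension_j * dimension_i + dimension_i)
      (dimension_j * dimension_i + dimension_i).toNat (startIndex + 1) []).getD ([], 0)

-- ===== PORT B =====
-- staged pipeline: slice out the table, one enumerate+filter parsing pass, chunk-slice regrouping;
-- the `none` branch is unreachable inside Pre_ (the Python raises ValueError there)
def read_3D_alt (dimension_i : Int) (dimension_j : Int) (content : List String) (startIndex : Int) :
    List (List (List Int)) × Int :=
  match ((PySem.List.enumerate (PySem.List.slice content (some (startIndex + 1))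
        (some (startIndex + 1 + dimension_i * (dimension_j + 1)))) 0).filter
      (fun p => !(PySem.Int.mod p.1 (dimension_j + 1) == 0))).mapM
      (fun p => pvParseStr p.2) with
  | none => ([], 0)
  | some rows =>
    ((PySem.List.pyRange 0 dimension_i 1).map
        (fun m => PySem.List.slice rows (some (m * dimension_j)) (some ((m + 1) * dimension_j))),
      startIndex + 1 + dimension_i * (dimension_j + 1))

-- ===== PRECONDITION & SPEC =====
def pvLineOK (content : List String) (idx : Int) : Bool :=
  match PySem.List.pyGet? content idx with
  | none => false
  | some s => (PySem.Chars.splitOn (PySem.Chars.strip s.toList) "\t".toList).all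
      (fun t => (PySem.Int.ofChars? t).isSome)

-- pvLinesOK content idx n: the n consecutive lines content[idx..idx+n-1] all exist and parse
def pvLinesOK (content : List String) : Int → Nat → Bool
  | _, 0 => true
  | idx, n + 1 => pvLineOK content idx && pvLinesOK content (idx + 1) n

-- pvTableOK content dj base m: m consecutive blocks of dj lines each (one header line between blocks)
def pvTableOK (content : List String) (dj : Int) : Int → Nat → Bool
  | _, 0 => true
  | base, m + 1 => pvLinesOK content base dj.toNat && pvTableOK content dj (base + dj + 1) m

-- Pre_ admits nonnegative dimensions with every needed line present and parsable, plus the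
-- degenerate cases where A's loop never runs (dimension_i = 0, or dimension_i < 0 with
-- dimension_j = -1). It excludes: inputs where a needed line is missing or fails int() (A raises
-- IndexError/ValueError); the other negative-dimension corners (A diverges or returns accidental
-- padded tables); and startIndex < -1 in the nonempty-table case, where A reads its lines through
-- Python negative-index wraparound from the end of the file — an accident of indexing, not a
-- behaviour a table parser is meant to have.
def Pre_read_3D (dimension_i : Int) (dimension_j : Int) (content : List String) (startIndex : Int) : Prop :=
  dimension_i = 0 ∨ (dimension_i < 0 ∧ dimension_j = -1) ∨
  (0 < dimension_i ∧ 0 ≤ dimension_j ∧ (dimension_j = 0 ∨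
    (-1 ≤ startIndex ∧ pvTableOK content dimension_j (startIndex + 2) dimension_i.toNat = true)))

instance (dimension_i : Int) (dimension_j : Int) (content : List String) (startIndex : Int) :
    Decidable (Pre_read_3D dimension_i dimension_j content startIndex) := by
  unfold Pre_read_3D; infer_instance

def pvWitness_read_3D : Int × Int × List String × Int := (1, 1, ["h", "m", "5"], 0)

def Spec_read_3D (dimension_i : Int) (dimension_j : Int) (content : List String) (startIndex : Int) (out : List (List (List Int)) × Int) : Prop := out = read_3D_alt dimension_i dimension_j content startIndex
instance (dimension_i : Int) (dimension_j : Int) (content : List String) (startIndex : Int) (out : List (List (List Int)) × Int) : Decidable (Spec_read_3D dimension_i dimension_j content startIndex out) := by unfold Spec_read_3D; infer_instance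

-- ===== CLAIM (what is proved, stated in full; the proofs are below) =====
def Claim_equal_read_3D : Prop := ∀ (dimension_i : Int) (dimension_j : Int) (content : List String) (startIndex : Int), Dom_read_3D dimension_i dimension_j content startIndex → Pre_read_3D dimension_i dimension_j content startIndex → Spec_read_3D dimension_i dimension_j content startIndex (read_3D dimension_i dimension_j content startIndex)

-- ===== LEMMAS AND PROOFS =====

-- proof-side canonical forms: the rows of one block / the list of blocks
def rowsOpt (content : List String) : Int → Nat → Option (List (List Int))
  | _, 0 => some []
  | base, n + 1 =>
    match pvParseLine content base with
    | none => none
    | some r => (rowsOpt content (base + 1) n).map (r :: ·)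

def blocksOpt (content : List String) (dj : Int) : Int → Nat → Option (List (List (List Int)))
  | _, 0 => some []
  | base, n + 1 =>
    match rowsOpt content (base + 1) dj.toNat with
    | none => none
    | some b => (blocksOpt content dj (base + 1 + dj) n).map (b :: ·)

theorem foldl_rowStep_none (content : List String) (l : List Int) :
    l.foldl (pvRowStep content) none = none := by
  induction l with
  | nil => rfl
  | cons x t ih => simpa [pvRowStep] using ih

theorem foldl_rowStep_spec (content : List String) (l : List Int) :
    ∀ (i : Int) (acc : List (List Int)),
      l.foldl (pvRowStep content) (some (i, acc)) =
        (rowsOpt content i l.length).map (fun rows => (i + l.length, acc ++ rows)) := by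
  induction l with
  | nil => intro i acc; simp [rowsOpt]
  | cons x t ih =>
    intro i acc
    simp only [List.foldl_cons, pvRowStep]
    cases hp : pvParseLine content i with
    | none => simp [foldl_rowStep_none, rowsOpt, hp]
    | some r =>
      rw [ih (i + 1) (acc ++ [r])]
      simp only [List.length_cons, rowsOpt, hp]
      cases hr : rowsOpt content (i + 1) t.length with
      | none => simp
      | some rows =>
        simp only [Option.map_some, Option.some.injEq, Prod.mk.injEq]
        constructor
        · push_cast; ring
        · simp

theorem rowsA_eq (content : List String) (dj : Int) (hj : 0 ≤ dj) (i : Int) :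
    pvRowsA content dj i =
      (rowsOpt content i dj.toNat).map (fun rows => (i + dj, rows)) := by
  unfold pvRowsA
  rw [PySem.List.pyRange_one, foldl_rowStep_spec]
  simp [Int.toNat_of_nonneg hj]

theorem loopA_spec (content : List String) (dj : Int) (hj : 0 ≤ dj) :
    ∀ (f : Nat) (i : Int) (S : List (List (List Int))),
      pvLoopA content dj (i + f * (dj + 1)) f i S =
        (blocksOpt content dj i f).map (fun bs => (S ++ bs, i + f * (dj + 1))) := by
  intro f
  induction f with
  | zero => intro i S; simp [pvLoopA, blocksOpt]
  | succ f ih =>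
    intro i S
    have hne : i ≠ i + ((f : Int) + 1) * (dj + 1) := by
      have h1 : (0 : Int) < ((f : Int) + 1) * (dj + 1) := by positivity
      omega
    simp only [pvLoopA, Nat.cast_add, Nat.cast_one]
    rw [if_neg hne]
    rw [rowsA_eq content dj hj (i + 1)]
    simp only [blocksOpt]
    cases hr : rowsOpt content (i + 1) dj.toNat with
    | none => simp
    | some b =>
      simp only [Option.map_some]
      have harith : i + 1 + dj + (f : Int) * (dj + 1) = i + ((f : Int) + 1) * (dj + 1) := by ring
      have := ih (i + 1 + dj) (S ++ [b])
      rw [harith] at this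
      rw [this]
      cases hb : blocksOpt content dj (i + 1 + dj) f with
      | none => simp
      | some bs => simp

-- enough fuel is as good as exact fuel: pvLoopA is fuel-monotone on successful runs
theorem loopA_fuel_mono (content : List String) (dj e : Int) :
    ∀ (f g : Nat) (i : Int) (S : List (List (List Int))) (r : List (List (List Int)) × Int),
      f ≤ g → pvLoopA content dj e f i S = some r → pvLoopA content dj e g i S = some r := by
  intro f
  induction f with
  | zero =>
    intro g i S r _ h
    simp only [pvLoopA] at h
    by_cases hi : i = e
    · rw [if_pos hi] at h
      cases g with
      | zero => simp only [pvLoopA]; rw [if_pos hi]; exact h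
      | succ g => simp only [pvLoopA]; rw [if_pos hi]; exact h
    · rw [if_neg hi] at h; cases h
  | succ f ih =>
    intro g i S r hle h
    obtain ⟨g', rfl⟩ : ∃ g', g = g' + 1 := ⟨g - 1, by omega⟩
    simp only [pvLoopA] at h ⊢
    by_cases hi : i = e
    · rw [if_pos hi] at h ⊢; exact h
    · rw [if_neg hi] at h ⊢
      cases hr : pvRowsA content dj (i + 1) with
      | none => rw [hr] at h; cases h
      | some p =>
        rw [hr] at h
        exact ih g' p.1 (S ++ [p.2]) r (by omega) h

-- ---- B-side lemmas ----

-- a mapM over Option succeeds when every element succeeds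
theorem mapM_isSome {α β : Type} {f : α → Option β} (l : List α)
    (h : ∀ x ∈ l, (f x).isSome = true) : ∃ r, l.mapM f = some r := by
  induction l with
  | nil => exact ⟨[], rfl⟩
  | cons x t ih =>
    obtain ⟨y, hy⟩ := Option.isSome_iff_exists.mp (h x (by simp))
    obtain ⟨r, hr⟩ := ih (fun z hz => h z (by simp [hz]))
    exact ⟨y :: r, by simp [List.mapM_cons, hy, hr]⟩

-- a run of parsable lines yields rowsOpt = some, of the right length, and lies inside content
theorem linesOK_rowsOpt (content : List String) :
    ∀ (k : Nat) (idx : Int), 0 ≤ idx → pvLinesOK content idx k = true →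
      ∃ r, rowsOpt content idx k = some r ∧ r.length = k ∧
        (k = 0 ∨ idx + k ≤ (content.length : Int)) := by
  intro k
  induction k with
  | zero => intro idx _ _; exact ⟨[], rfl, rfl, Or.inl rfl⟩
  | succ k ih =>
    intro idx h0 hl
    simp only [pvLinesOK, Bool.and_eq_true] at hl
    obtain ⟨h1, h2⟩ := hl
    unfold pvLineOK at h1
    cases hg : PySem.List.pyGet? content idx with
    | none => rw [hg] at h1; simp at h1
    | some s =>
      rw [hg] at h1
      have hlt : idx.toNat < content.length := by
        rw [PySem.List.pyGet?_of_nonneg content h0] at hg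
        exact (List.getElem?_eq_some_iff.mp hg).1
      have hp : ∃ r0, pvParseStr s = some r0 := by
        unfold pvParseStr
        apply mapM_isSome
        intro t ht
        exact List.all_eq_true.mp h1 t ht
      obtain ⟨r0, hp0⟩ := hp
      obtain ⟨r, hr, hlen, hbnd⟩ := ih (idx + 1) (by omega) h2
      refine ⟨r0 :: r, ?_, by simp [hlen], Or.inr ?_⟩
      · simp only [rowsOpt, pvParseLine, hg, hp0, hr, Option.map_some]
      · rcases hbnd with h | h
        · subst h; push_cast; omega
        · push_cast at h ⊢; omega

-- tableOK yields blocksOpt = some with block lengths dj.toNat, inside content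
theorem tableOK_blocksOpt (content : List String) (dj : Int) (hd : 0 < dj) :
    ∀ (n : Nat) (base : Int), 0 ≤ base → pvTableOK content dj (base + 1) n = true →
      ∃ bs, blocksOpt content dj base n = some bs ∧ bs.length = n ∧
        (∀ b ∈ bs, b.length = dj.toNat) ∧
        (n = 0 ∨ base + n * (dj + 1) ≤ (content.length : Int)) := by
  intro n
  induction n with
  | zero => intro base _ _; exact ⟨[], rfl, rfl, by simp, Or.inl rfl⟩
  | succ n ih =>
    intro base hb hT
    simp only [pvTableOK, Bool.and_eq_true] at hT
    obtain ⟨h1, h2⟩ := hT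
    obtain ⟨b, hbrows, hblen, hbbnd⟩ := linesOK_rowsOpt content dj.toNat (base + 1) (by omega) h1
    have h2' : pvTableOK content dj (base + dj + 1 + 1) n = true := by
      have : base + 1 + dj + 1 = base + dj + 1 + 1 := by ring
      rw [← this]; exact h2
    obtain ⟨bs', hbs', hlen', hall', hbnd'⟩ := ih (base + dj + 1) (by omega) h2'
    have hd' : (dj.toNat : Int) = dj := Int.toNat_of_nonneg hd.le
    have hfit : base + 1 + dj ≤ (content.length : Int) := by
      rcases hbbnd with h | h
      · omega
      · omega
    refine ⟨b :: bs', ?_, by simp [hlen'], ?_, Or.inr ?_⟩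
    · simp only [blocksOpt, hbrows]
      have : base + 1 + dj = base + dj + 1 := by ring
      rw [this, hbs', Option.map_some]
    · intro x hx
      rcases List.mem_cons.mp hx with h | h
      · subst h; exact hblen
      · exact hall' x h
    · rcases hbnd' with h | h
      · subst h; push_cast; nlinarith
      · push_cast at h ⊢; nlinarith

-- rowsOpt read positionally equals mapM parse over the corresponding window of content
theorem rowsOpt_window (content : List String) :
    ∀ (k : Nat) (idx : Int) (r : List (List Int)), 0 ≤ idx →
      rowsOpt content idx k = some r →
      ((content.drop idx.toNat).take k).mapM pvParseStr = some r := by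
  intro k
  induction k with
  | zero =>
    intro idx r _ hr
    simp only [rowsOpt, Option.some.injEq] at hr
    subst hr; rfl
  | succ k ih =>
    intro idx r h0 hr
    cases hp : pvParseLine content idx with
    | none => simp only [rowsOpt, hp] at hr; cases hr
    | some r0 =>
      cases hrest : rowsOpt content (idx + 1) k with
      | none => simp only [rowsOpt, hp, hrest] at hr; cases hr
      | some rest =>
        simp only [rowsOpt, hp, hrest, Option.map_some, Option.some.injEq] at hr
        subst hr
        unfold pvParseLine at hp
        cases hg : PySem.List.pyGet? content idx with
        | none => rw [hg] at hp; cases hp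
        | some s =>
          rw [hg] at hp
          rw [PySem.List.pyGet?_of_nonneg content h0] at hg
          have hlt : idx.toNat < content.length := (List.getElem?_eq_some_iff.mp hg).1
          have hs : content[idx.toNat] = s := (List.getElem?_eq_some_iff.mp hg).2
          have hp' : pvParseStr s = some r0 := hp
          rw [List.drop_eq_getElem_cons hlt, List.take_succ_cons, List.mapM_cons, hs, hp']
          have h1 : (idx + 1).toNat = idx.toNat + 1 := by omega
          rw [← h1, ih (idx + 1) rest (by omega) hrest]
          rfl

-- the enumerate+filter+mapM pass over the table window produces the flattened blocks
theorem pipeline_window (content : List String) (dj : Int) (hd : 0 < dj) :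
    ∀ (n : Nat) (base off : Int) (bs : List (List (List Int))),
      0 ≤ base → 0 ≤ off → (dj + 1) ∣ off →
      blocksOpt content dj base n = some bs →
      (n = 0 ∨ base + n * (dj + 1) ≤ (content.length : Int)) →
      ((PySem.List.enumerate ((content.drop base.toNat).take (n * (dj.toNat + 1))) off).filter
          (fun p => !(PySem.Int.mod p.1 (dj + 1) == 0))).mapM (fun p => pvParseStr p.2) =
        some bs.flatten := by
  intro n
  induction n with
  | zero =>
    intro base off bs _ _ _ hbs _
    simp only [blocksOpt, Option.some.injEq] at hbs
    subst hbs
    simp [PySem.List.enumerate_nil]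
  | succ n ih =>
    intro base off bs hb ho hdvd hbs hbnd
    cases hrows : rowsOpt content (base + 1) dj.toNat with
    | none => simp only [blocksOpt, hrows] at hbs; cases hbs
    | some b =>
      cases hbs' : blocksOpt content dj (base + 1 + dj) n with
      | none => simp only [blocksOpt, hrows, hbs'] at hbs; cases hbs
      | some bs' =>
        simp only [blocksOpt, hrows, hbs', Option.map_some, Option.some.injEq] at hbs
        subst hbs
        have hdc : (dj.toNat : Int) = dj := Int.toNat_of_nonneg hd.le
        have hbd : base + ((n : Int) + 1) * (dj + 1) ≤ (content.length : Int) := by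
          rcases hbnd with h | h
          · cases h
          · push_cast at h; exact h
        have hcast : (((n + 1) * (dj.toNat + 1) : Nat) : Int) = ((n : Int) + 1) * (dj + 1) := by
          push_cast [hdc]; ring
        have hnat : base.toNat + (n + 1) * (dj.toNat + 1) ≤ content.length := by omega
        have hponce : dj.toNat + 1 ≤ (n + 1) * (dj.toNat + 1) :=
          Nat.le_mul_of_pos_left _ n.succ_pos
        have hlt : base.toNat < content.length := by omega
        have hsplit : (content.drop base.toNat).take ((n + 1) * (dj.toNat + 1)) =
            (content.drop base.toNat).take (dj.toNat + 1) ++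
              (content.drop (base.toNat + (dj.toNat + 1))).take (n * (dj.toNat + 1)) := by
          rw [show (n + 1) * (dj.toNat + 1) = (dj.toNat + 1) + n * (dj.toNat + 1) by ring,
            List.take_add, List.drop_drop]
        have hhead : (content.drop base.toNat).take (dj.toNat + 1) =
            content[base.toNat] :: (content.drop (base.toNat + 1)).take dj.toNat := by
          rw [List.drop_eq_getElem_cons hlt, List.take_succ_cons]
        have hclen : ((content.drop (base.toNat + 1)).take dj.toNat).length = dj.toNat := by
          rw [List.length_take, List.length_drop]; omega
        rw [hsplit, hhead, List.cons_append, PySem.List.enumerate_cons,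
          PySem.List.enumerate_append]
        have hmod0 : PySem.Int.mod off (dj + 1) = 0 :=
          (PySem.Int.mod_eq_zero_iff_dvd off (dj + 1)).mpr hdvd
        rw [List.filter_cons_of_neg (by simp [hmod0]), List.filter_append]
        have hkeep : (PySem.List.enumerate ((content.drop (base.toNat + 1)).take dj.toNat)
            (off + 1)).filter (fun p => !(PySem.Int.mod p.1 (dj + 1) == 0)) =
            PySem.List.enumerate ((content.drop (base.toNat + 1)).take dj.toNat) (off + 1) := by
          apply List.filter_eq_self.mpr
          intro p hp
          rw [PySem.List.mem_enumerate_iff] at hp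
          obtain ⟨k, hk, rfl⟩ := hp
          simp only [Bool.not_eq_eq_eq_not, Bool.not_true, beq_eq_false_iff_ne, ne_eq]
          intro hmod
          have hdvd2 : (dj + 1) ∣ (off + 1 + (k : Int)) :=
            (PySem.Int.mod_eq_zero_iff_dvd _ _).mp hmod
          have hdvd3 : (dj + 1) ∣ (1 + (k : Int)) := by
            have := dvd_sub hdvd2 hdvd
            simpa [add_sub_cancel_left, add_assoc, add_comm, add_left_comm] using this
          have hle := Int.le_of_dvd (by omega) hdvd3
          rw [hclen] at hk
          have : (k : Int) < dj := by omega
          omega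
        rw [hkeep, List.mapM_append]
        have hE1 : (PySem.List.enumerate ((content.drop (base.toNat + 1)).take dj.toNat)
            (off + 1)).mapM (fun p => pvParseStr p.2) = some b := by
          have hm := List.mapM_map (f := fun x : Int × String => x.2) (g := pvParseStr)
            (l := PySem.List.enumerate ((content.drop (base.toNat + 1)).take dj.toNat) (off + 1))
          rw [PySem.List.map_snd_enumerate] at hm
          have hw := rowsOpt_window content dj.toNat (base + 1) b (by omega) hrows
          have ht : (base + 1).toNat = base.toNat + 1 := by omega
          rw [ht] at hw
          rw [hm] at hw
          exact hw
        rw [hE1]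
        have hrest : ((PySem.List.enumerate ((content.drop (base.toNat + (dj.toNat + 1))).take
            (n * (dj.toNat + 1))) (off + 1 + (((content.drop (base.toNat + 1)).take
            dj.toNat).length : Int))).filter (fun p => !(PySem.Int.mod p.1 (dj + 1) == 0))).mapM
            (fun p => pvParseStr p.2) = some bs'.flatten := by
          have hoff : off + 1 + ((((content.drop (base.toNat + 1)).take dj.toNat).length : Nat) : Int) =
              off + (dj + 1) := by rw [hclen]; omega
          rw [hoff]
          have hbase : base.toNat + (dj.toNat + 1) = (base + dj + 1).toNat := by omega
          rw [hbase]
          have hbs'' : blocksOpt content dj (base + dj + 1) n = some bs' := by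
            rw [show base + dj + 1 = base + 1 + dj by ring]; exact hbs'
          apply ih (base + dj + 1) (off + (dj + 1)) bs' (by omega) (by omega)
            (dvd_add hdvd dvd_rfl) hbs''
          right
          have : base + dj + 1 + (n : Int) * (dj + 1) = base + ((n : Int) + 1) * (dj + 1) := by ring
          omega
        rw [hrest]
        simp [List.flatten_cons]

-- chunk slicing recovers the blocks from the flat row list
theorem chunks_of_flatten (d : Int) (hd : 0 ≤ d) :
    ∀ (bs : List (List (List Int))) (front : List (List Int)) (a : Int), 0 ≤ a →
      front.length = (a * d).toNat → (∀ b ∈ bs, b.length = d.toNat) →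
      (PySem.List.pyRange a (a + (bs.length : Int)) 1).map
          (fun m => PySem.List.slice (front ++ bs.flatten) (some (m * d)) (some ((m + 1) * d))) =
        bs := by
  intro bs
  induction bs with
  | nil =>
    intro front a ha _ _
    simp only [List.length_nil, Nat.cast_zero, add_zero, List.map_eq_nil_iff]
    exact PySem.List.pyRange_one_eq_nil (le_refl a)
  | cons b bs ih =>
    intro front a ha hfl hall
    have hcons : PySem.List.pyRange a (a + ((b :: bs).length : Int)) 1 =
        a :: PySem.List.pyRange (a + 1) (a + ((b :: bs).length : Int)) 1 := by
      apply PySem.List.pyRange_one_cons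
      have : (0 : Int) < ((b :: bs).length : Int) := by
        simp only [List.length_cons]; push_cast; omega
      omega
    rw [hcons, List.map_cons]
    have hble : b.length = d.toNat := hall b (by simp)
    have e : (a + 1) * d = a * d + d := by ring
    have h0 : 0 ≤ a * d := mul_nonneg ha hd
    have hhead : PySem.List.slice (front ++ (b :: bs).flatten) (some (a * d)) (some ((a + 1) * d)) = b := by
      rw [PySem.List.slice_toNat _ h0 (by omega)]
      have htn : ((a + 1) * d).toNat - (a * d).toNat = d.toNat := by rw [e]; omega
      rw [htn, List.flatten_cons, ← hfl, List.drop_left, List.take_left' hble]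
    rw [hhead]
    have htail : PySem.List.pyRange (a + 1) (a + ((b :: bs).length : Int)) 1 =
        PySem.List.pyRange (a + 1) ((a + 1) + (bs.length : Int)) 1 := by
      have : a + ((b :: bs).length : Int) = (a + 1) + (bs.length : Int) := by
        simp only [List.length_cons]; push_cast; ring
      rw [this]
    have hassoc : front ++ (b :: bs).flatten = (front ++ b) ++ bs.flatten := by
      simp [List.flatten_cons]
    rw [htail, hassoc, ih (front ++ b) (a + 1) (by omega)
      (by rw [List.length_append, hfl, hble, e]; omega)
      (fun x hx => hall x (by simp [hx]))]

-- a slice with equal endpoints is empty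
theorem slice_self_nil {α : Type} (xs : List α) (a : Int) :
    PySem.List.slice xs (some a) (some a) = [] := by
  have h := PySem.List.length_slice xs a a
  exact List.eq_nil_of_length_eq_zero (by omega)

-- any slice of the empty list is empty
theorem slice_nil {α : Type} (a b : Int) :
    PySem.List.slice ([] : List α) (some a) (some b) = [] := by
  have h := PySem.List.length_slice ([] : List α) a b
  have hb := PySem.List.clampIdx_le ([] : List α).length b
  simp only [List.length_nil, Nat.le_zero] at hb h
  exact List.eq_nil_of_length_eq_zero (by omega)

-- the dj = 0 shapes
theorem blocksOpt_zero (content : List String) :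
    ∀ (n : Nat) (base : Int), blocksOpt content 0 base n = some (List.replicate n []) := by
  intro n
  induction n with
  | zero => intro base; simp [blocksOpt]
  | succ n ih =>
    intro base
    simp only [blocksOpt, Int.toNat_zero, rowsOpt, ih, Option.map_some]
    rfl

-- ===== VERDICT (by name: the statement is the Claim_ definition above) =====
theorem read_3D_spec : Claim_equal_read_3D := by
  intro di dj content s _hD hP
  rcases hP with h0 | ⟨hneg, hj1⟩ | ⟨hpos, hj, hrest⟩
  · subst h0
    unfold Spec_read_3D read_3D read_3D_alt
    simp only [Int.toNat_zero, pvLoopA, mul_zero, zero_mul, add_zero]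
    rw [slice_self_nil, PySem.List.enumerate_nil,
      PySem.List.pyRange_one_eq_nil (le_refl (0 : Int))]
    simp
  · subst hj1
    unfold Spec_read_3D read_3D read_3D_alt
    rw [show (-1 * di + di).toNat = 0 from by rw [show -1 * di + di = 0 from by ring]; rfl]
    simp only [pvLoopA]
    have h1 : s + 1 + -1 * di + di = s + 1 := by ring
    have h2 : s + 1 + di * (-1 + 1) = s + 1 := by ring
    rw [h1, h2, slice_self_nil, PySem.List.enumerate_nil,
      PySem.List.pyRange_one_eq_nil hneg.le]
    simp
  · have hdi : (di.toNat : Int) = di := Int.toNat_of_nonneg hpos.le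
    by_cases hdj0 : dj = 0
    · -- dj = 0: every block is empty; B's filter drops everything
      subst hdj0
      unfold Spec_read_3D read_3D read_3D_alt
      have hE : s + 1 + 0 * di + di = (s + 1) + (di.toNat : Int) * (0 + 1) := by
        rw [hdi]; ring
      rw [show (0 * di + di).toNat = di.toNat from by rw [zero_mul, zero_add]]
      rw [hE, loopA_spec content 0 (le_refl 0) di.toNat (s + 1) [], blocksOpt_zero]
      have hfilter : ∀ (tbl : List (Int × String)),
          tbl.filter (fun p => !(PySem.Int.mod p.1 (0 + 1) == 0)) = [] := by
        intro tbl
        apply List.filter_eq_nil_iff.mpr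
        intro p _
        simp
      rw [hfilter]
      simp only [List.mapM_nil, Option.map_some, Option.getD_some, List.nil_append]
      have hmap : (PySem.List.pyRange 0 di 1).map
          (fun m => PySem.List.slice ([] : List (List Int)) (some (m * 0)) (some ((m + 1) * 0))) =
          List.replicate di.toNat [] := by
        rw [List.map_congr_left (fun m _ => slice_nil (m * 0) ((m + 1) * 0)), List.map_const',
          PySem.List.length_pyRange_one]
        norm_num
      rw [hmap, hdi]
    · rcases hrest with h | ⟨hs, hT⟩
      · exact absurd h hdj0
      have hd : 0 < dj := lt_of_le_of_ne hj (Ne.symm hdj0)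
      have hdc : (dj.toNat : Int) = dj := Int.toNat_of_nonneg hj
      obtain ⟨bs, hbs, hblen, hball, hbnd⟩ := tableOK_blocksOpt content dj hd di.toNat (s + 1)
        (by omega) (by rw [show s + 1 + 1 = s + 2 by ring]; exact hT)
      have hn0 : di.toNat ≠ 0 := by omega
      have hlenbnd : s + 1 + (di.toNat : Int) * (dj + 1) ≤ (content.length : Int) := by
        rcases hbnd with h | h
        · exact absurd h hn0
        · exact h
      unfold Spec_read_3D read_3D read_3D_alt
      have hE : s + 1 + dj * di + di = (s + 1) + (di.toNat : Int) * (dj + 1) := by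
        rw [hdi]; ring
      have hrun : pvLoopA content dj ((s + 1) + (di.toNat : Int) * (dj + 1)) di.toNat (s + 1) [] =
          some (bs, (s + 1) + (di.toNat : Int) * (dj + 1)) := by
        rw [loopA_spec content dj hj di.toNat (s + 1) [], hbs]
        simp
      have hfuel : di.toNat ≤ (dj * di + di).toNat := by
        have h1 : dj * di + di = di * (dj + 1) := by ring
        have h2 : (di * (dj + 1)).toNat = di.toNat * (dj.toNat + 1) := by
          rw [show di * (dj + 1) = ((di.toNat * (dj.toNat + 1) : Nat) : Int) from by
            push_cast [hdi, hdc]; ring]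
          exact Int.toNat_natCast _
        rw [h1, h2]
        exact Nat.le_mul_of_pos_right _ (by omega)
      rw [hE, loopA_fuel_mono content dj ((s + 1) + (di.toNat : Int) * (dj + 1)) di.toNat
        ((dj * di + di).toNat) (s + 1) [] _ hfuel hrun]
      simp only [Option.getD_some]
      -- B side
      have hmulnn : 0 ≤ di * (dj + 1) := mul_nonneg hpos.le (by omega)
      rw [PySem.List.slice_toNat content (by omega) (by omega)]
      have hcast2 : ((di.toNat * (dj.toNat + 1) : Nat) : Int) = di * (dj + 1) := by
        push_cast [hdi, hdc]; ring
      have htake : (s + 1 + di * (dj + 1)).toNat - (s + 1).toNat = di.toNat * (dj.toNat + 1) := by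
        omega
      rw [htake]
      rw [pipeline_window content dj hd di.toNat (s + 1) 0 bs (by omega) le_rfl (dvd_zero _) hbs
        (Or.inr hlenbnd)]
      have hchunks := chunks_of_flatten dj hj bs [] 0 le_rfl (by simp) hball
      simp only [List.nil_append, zero_add] at hchunks
      rw [show (bs.length : Int) = di by rw [hblen, hdi]] at hchunks
      simp only [hchunks, hdi]
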